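-- pv_equiv track=rewrite | github.com/Yuta1004/Procon30BattleSystem | server/simulator/test.py | _is_point_symmetry
-- ===== SOURCE A (Python) =====
-- def _is_point_symmetry(target):
--     width = len(target[0])
--     height = len(target)
--     result = True
--     for y in range(height):
--         for x in range(width):
--             result &= (target[height - y - 1][width - x - 1] == target[y][x])
--     return result
-- ===== SOURCE B (Python) =====
-- def _is_point_symmetry(target):
--     w = len(target[0])
--     flat = [row[x] for row in target for x in range(w)]
--     return flat == flat[::-1]
-- ===== Notes on version B (the rewrite author's own statement) =====
-- stated objective: alternative
-- what changed: B flattens the w-column grid row-major into one list and checks that the flat list is a palindrome (cell (y,x) and its point-mirror land at mirrored flat positions), replacing A's nested index loops accumulating per-cell '&=' comparisons; Pre_ excludes only the inputs where A raises IndexError (empty grid, or a row shorter than row 0).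
import Mathlib
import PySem

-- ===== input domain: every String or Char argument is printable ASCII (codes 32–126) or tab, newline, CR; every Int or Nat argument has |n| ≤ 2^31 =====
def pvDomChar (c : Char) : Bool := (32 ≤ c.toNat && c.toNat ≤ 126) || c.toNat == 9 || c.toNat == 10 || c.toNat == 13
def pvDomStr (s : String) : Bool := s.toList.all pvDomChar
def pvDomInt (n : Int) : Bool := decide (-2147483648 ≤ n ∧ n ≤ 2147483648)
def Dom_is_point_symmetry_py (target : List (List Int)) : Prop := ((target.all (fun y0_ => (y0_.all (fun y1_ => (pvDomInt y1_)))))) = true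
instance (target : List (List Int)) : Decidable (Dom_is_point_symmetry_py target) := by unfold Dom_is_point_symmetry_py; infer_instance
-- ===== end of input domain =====

-- B flattens the grid row-major and checks that the flat list is a palindrome, instead of A's nested per-cell '&=' loops (objective: alternative algorithm).

-- ===== PORT A =====
def is_point_symmetry_py (target : List (List Int)) : Bool :=
  let width : Int := (PySem.List.pyGetD target 0 []).length
  let height : Int := target.length
  (PySem.List.pyRange 0 height 1).foldl (fun result y =>
    (PySem.List.pyRange 0 width 1).foldl (fun result x =>
      result && decide (PySem.List.pyGetD (PySem.List.pyGetD target (height - y - 1) []) (width - x - 1) 0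
        = PySem.List.pyGetD (PySem.List.pyGetD target y []) x 0)) result) true

-- ===== PORT B =====
def is_point_symmetry_py_alt (target : List (List Int)) : Bool :=
  let w : Int := (PySem.List.pyGetD target 0 []).length
  let flat := target.flatMap (fun row =>
    (PySem.List.pyRange 0 w 1).map (fun x => PySem.List.pyGetD row x 0))   -- [row[x] for row in target for x in range(w)]
  decide (some flat = PySem.List.slice? flat none none (-1))               -- flat == flat[::-1]

-- ===== PRECONDITION & SPEC =====
-- Pre_ excludes exactly the inputs where the Python A raises IndexError: the empty grid
-- (A reads target[0] before looping) and grids where some row is shorter than row 0.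
def Pre_is_point_symmetry_py (target : List (List Int)) : Prop :=
  target ≠ [] ∧ ∀ r ∈ target, (target.headD []).length ≤ r.length
instance (target : List (List Int)) : Decidable (Pre_is_point_symmetry_py target) := by unfold Pre_is_point_symmetry_py; infer_instance
def pvWitness_is_point_symmetry_py : List (List Int) := [[1, 2], [2, 1]]
def Spec_is_point_symmetry_py (target : List (List Int)) (out : Bool) : Prop := out = is_point_symmetry_py_alt target
instance (target : List (List Int)) (out : Bool) : Decidable (Spec_is_point_symmetry_py target out) := by unfold Spec_is_point_symmetry_py; infer_instance

-- ===== CLAIM (what is proved, stated in full; the proofs are below) =====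
def Claim_equal_is_point_symmetry_py : Prop := ∀ (target : List (List Int)), Dom_is_point_symmetry_py target → Pre_is_point_symmetry_py target → Spec_is_point_symmetry_py target (is_point_symmetry_py target)

-- ===== LEMMAS AND PROOFS =====

-- A fold of '&&' over a list is List.all.
lemma foldl_and_eq_all {α : Type} (l : List α) (p : α → Bool) (init : Bool) :
    l.foldl (fun b i => b && p i) init = (init && l.all p) := by
  induction l generalizing init with
  | nil => simp
  | cons a t ih => simp [List.all_cons, ih, Bool.and_assoc]

-- indexing the first n entries of a row is its n-prefix
lemma map_pyRange_pyGetD_take (r : List Int) (n : Nat) (hn : n ≤ r.length) :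
    (PySem.List.pyRange 0 (n : Int) 1).map (fun x => PySem.List.pyGetD r x 0) = r.take n := by
  rw [PySem.List.pyRange_one]
  apply List.ext_getElem
  · simp; omega
  · intro i h1 h2
    obtain ⟨hi, -⟩ : i < n ∧ i < r.length := by simpa using h2
    simp [PySem.List.pyGetD_natCast, List.getD_eq_getElem?_getD, List.getElem?_eq_getElem (by omega : i < r.length)]

-- reading inside the first w entries of a truncated row is reading the row
lemma take_getD (r : List Int) (w x : Nat) (hx : x < w) :
    (r.take w).getD x 0 = r.getD x 0 := by
  simp [List.getD_eq_getElem?_getD, hx]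

-- two lists of lists with the same row-length profile have equal flattenings iff they are equal
lemma flatten_eq_iff_of_shape (g1 g2 : List (List Int))
    (h : g1.map List.length = g2.map List.length) :
    g1.flatten = g2.flatten ↔ g1 = g2 := by
  induction g1 generalizing g2 with
  | nil =>
    cases g2 with
    | nil => simp
    | cons b s => simp at h
  | cons a t ih =>
    cases g2 with
    | nil => simp at h
    | cons b s =>
      simp only [List.map_cons, List.cons.injEq] at h
      obtain ⟨hab, hts⟩ := h
      simp only [List.flatten_cons, List.cons.injEq]
      constructor
      · intro he
        obtain ⟨h1, h2⟩ := List.append_inj he hab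
        exact ⟨h1, (ih s hts).1 h2⟩
      · rintro ⟨rfl, rfl⟩; rfl

-- a rectangular grid equals its 180° rotation iff every cell equals its mirrored cell
lemma sym_iff (g : List (List Int)) (w : Nat) (hw : ∀ r ∈ g, r.length = w) :
    (g = g.reverse.map List.reverse) ↔
    (∀ y < g.length, ∀ x < w,
      (g.getD (g.length - 1 - y) []).getD (w - 1 - x) 0 = (g.getD y []).getD x 0) := by
  have hrow : ∀ y (hy : y < g.length), g[y].length = w := fun y hy => hw _ (List.getElem_mem hy)
  constructor
  · intro heq y hy x hx
    have hy' : g.length - 1 - y < g.length := by omega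
    have hl1 := hrow y hy
    have hl2 := hrow _ hy'
    rw [List.getD_eq_getElem g [] hy, List.getD_eq_getElem g [] hy',
        List.getD_eq_getElem _ 0 (by omega), List.getD_eq_getElem _ 0 (by omega)]
    have h1 : g[y] = g[g.length - 1 - y].reverse := by
      have := List.getElem_of_eq heq hy
      rwa [List.getElem_map, List.getElem_reverse] at this
    have hx2 : x < g[g.length - 1 - y].reverse.length := by simp; omega
    have h2 : g[y][x]'(by omega) = g[g.length - 1 - y].reverse[x]'hx2 :=
      List.getElem_of_eq h1 _
    rw [h2, List.getElem_reverse]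
    congr 1
    omega
  · intro hcell
    apply List.ext_getElem (by simp)
    intro y hy hy2
    have hy' : g.length - 1 - y < g.length := by omega
    have hl1 := hrow y hy
    have hl2 := hrow _ hy'
    rw [List.getElem_map, List.getElem_reverse]
    apply List.ext_getElem (by simp; omega)
    intro x hx hx2
    have hxw : x < w := by omega
    have := hcell y hy x hxw
    rw [List.getD_eq_getElem g [] hy, List.getD_eq_getElem g [] hy',
        List.getD_eq_getElem _ 0 (by omega), List.getD_eq_getElem _ 0 (by omega)] at this
    rw [List.getElem_reverse, ← this]
    congr 1
    omega

-- ===== VERDICT (by name: the statement is the Claim_ definition above) =====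
theorem is_point_symmetry_py_spec : Claim_equal_is_point_symmetry_py := by
  intro target _hdom hpre
  obtain ⟨hne, hlen⟩ := hpre
  unfold Spec_is_point_symmetry_py
  obtain ⟨r0, rs, rfl⟩ : ∃ r0 rs, target = r0 :: rs := by
    cases target with
    | nil => exact absurd rfl hne
    | cons a t => exact ⟨a, t, rfl⟩
  set t : List (List Int) := r0 :: rs with ht
  have hlen' : ∀ r ∈ t, r0.length ≤ r.length := by
    intro r hr; simpa using hlen r hr
  -- normalize A to an `all` over ranges
  have hA : is_point_symmetry_py t =
      ((PySem.List.pyRange 0 (t.length : Int) 1).all (fun y =>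
        (PySem.List.pyRange 0 (r0.length : Int) 1).all (fun x =>
          decide (PySem.List.pyGetD (PySem.List.pyGetD t ((t.length : Int) - y - 1) []) ((r0.length : Int) - x - 1) 0
            = PySem.List.pyGetD (PySem.List.pyGetD t y []) x 0)))) := by
    unfold is_point_symmetry_py
    simp only [foldl_and_eq_all, Bool.true_and, PySem.List.pyGetD_zero_cons, ht]
  -- the w-column prefix grid; B's flat list is its flattening
  set g : List (List Int) := t.map (fun r => r.take r0.length) with hg
  have hB : is_point_symmetry_py_alt t = decide (g.flatten = g.flatten.reverse) := by
    have hmap : List.map (fun row => List.map (fun x => PySem.List.pyGetD row x 0)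
        (PySem.List.pyRange 0 ((r0.length : Nat) : Int) 1)) (r0 :: rs) = g := by
      rw [hg, ht]
      apply List.map_congr_left
      intro r hr
      exact map_pyRange_pyGetD_take r r0.length (hlen' r (by rw [ht]; exact hr))
    unfold is_point_symmetry_py_alt
    simp only [ht, PySem.List.pyGetD_zero_cons, PySem.List.slice?_none_none_neg_one, List.flatMap_def]
    rw [hmap]
    simp
  have hgw : ∀ r ∈ g, r.length = r0.length := by
    intro r hr
    rw [hg] at hr
    obtain ⟨r', hr', rfl⟩ := List.mem_map.1 hr
    have := hlen' r' hr'
    simp [List.length_take]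
    omega
  have hglen : g.length = t.length := by simp [hg]
  -- same row-length profile for g and its 180° rotation
  have hshape : g.map List.length = (g.reverse.map List.reverse).map List.length := by
    have h1 : g.map List.length = List.replicate g.length r0.length := by
      rw [show g.length = (g.map List.length).length by simp]
      apply List.eq_replicate_of_mem
      intro l hl
      obtain ⟨r, hr, rfl⟩ := List.mem_map.1 hl
      exact hgw r hr
    have h2 : (g.reverse.map List.reverse).map List.length = List.replicate g.length r0.length := by
      rw [show g.length = ((g.reverse.map List.reverse).map List.length).length by simp]
      apply List.eq_replicate_of_mem
      intro l hl
      obtain ⟨r, hr, rfl⟩ := List.mem_map.1 hl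
      obtain ⟨r', hr', rfl⟩ := List.mem_map.1 hr
      simpa using hgw r' (List.mem_reverse.1 hr')
    rw [h1, h2]
  have hflat : g.flatten.reverse = (g.reverse.map List.reverse).flatten := by
    rw [List.reverse_flatten, List.map_reverse]
  -- grid cell = target cell on the window
  have hcellg : ∀ y < t.length, ∀ x < r0.length,
      (g.getD y []).getD x 0 = (t.getD y []).getD x 0 := by
    intro y hy x hx
    have hyg : y < g.length := by omega
    rw [List.getD_eq_getElem g [] hyg, List.getD_eq_getElem t [] hy]
    have hge : g[y] = t[y].take r0.length := by simp [hg]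
    rw [hge]
    exact take_getD _ _ _ hx
  -- A's per-cell condition ↔ the palindrome test
  have key : is_point_symmetry_py t = true ↔ is_point_symmetry_py_alt t = true := by
    rw [hA, hB, decide_eq_true_iff, hflat, flatten_eq_iff_of_shape _ _ hshape,
        sym_iff g r0.length hgw, hglen]
    simp only [List.all_eq_true, PySem.List.mem_pyRange_one, decide_eq_true_iff]
    constructor
    · intro hall y hy x hx
      have hy' : t.length - 1 - y < t.length := by omega
      have := hall (y : Int) ⟨by omega, by exact_mod_cast hy⟩ (x : Int) ⟨by omega, by exact_mod_cast hx⟩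
      have e1 : (t.length : Int) - (y : Int) - 1 = ((t.length - 1 - y : Nat) : Int) := by omega
      have e2 : (r0.length : Int) - (x : Int) - 1 = ((r0.length - 1 - x : Nat) : Int) := by omega
      rw [e1, e2] at this
      simp only [PySem.List.pyGetD_natCast] at this
      rw [hcellg _ hy' _ (by omega), hcellg _ hy _ hx]
      exact this
    · intro hall y ⟨hy0, hyh⟩ x ⟨hx0, hxw⟩
      have hy : y.toNat < t.length := by omega
      have hx : x.toNat < r0.length := by omega
      have hy' : t.length - 1 - y.toNat < t.length := by omega
      have := hall y.toNat hy x.toNat hx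
      rw [hcellg _ hy' _ (by omega), hcellg _ hy _ hx] at this
      have e0 : y = ((y.toNat : Nat) : Int) := by omega
      have e0' : x = ((x.toNat : Nat) : Int) := by omega
      have e1 : (t.length : Int) - y - 1 = ((t.length - 1 - y.toNat : Nat) : Int) := by omega
      have e2 : (r0.length : Int) - x - 1 = ((r0.length - 1 - x.toNat : Nat) : Int) := by omega
      rw [e1, e2, e0, e0']
      simp only [PySem.List.pyGetD_natCast]
      exact this
  rcases Bool.eq_false_or_eq_true (is_point_symmetry_py t) with h | h <;>
    rcases Bool.eq_false_or_eq_true (is_point_symmetry_py_alt t) with h' | h' <;>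
      simp_all
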